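-- pv_equiv track=rewrite | github.com/AlbinSmiley/bezoutPython | bezout.py | resteDe
-- ===== SOURCE A (Python) =====
-- def resteDe(n1, n2):
--     resultats = [n1, n2]
--     i = 0
--     while resultats[i + 1] != 0:
--         reste = resultats[i] % resultats[i + 1]
--         resultats.append(reste)
--         i += 1
--     return resultats
-- ===== SOURCE B (Python) =====
-- def resteDe(n1, n2):
--     if n2 == 0:
--         return [n1, n2]
--     return [n1] + resteDe(n2, n1 % n2)
-- ===== Notes on version B (the rewrite author's own statement) =====
-- stated objective: simpler
-- what changed: Replaces the index-managed while loop that appends to a growing list with a direct recursion on the pair (n2, n1 % n2) that prepends each head.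
import Mathlib
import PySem

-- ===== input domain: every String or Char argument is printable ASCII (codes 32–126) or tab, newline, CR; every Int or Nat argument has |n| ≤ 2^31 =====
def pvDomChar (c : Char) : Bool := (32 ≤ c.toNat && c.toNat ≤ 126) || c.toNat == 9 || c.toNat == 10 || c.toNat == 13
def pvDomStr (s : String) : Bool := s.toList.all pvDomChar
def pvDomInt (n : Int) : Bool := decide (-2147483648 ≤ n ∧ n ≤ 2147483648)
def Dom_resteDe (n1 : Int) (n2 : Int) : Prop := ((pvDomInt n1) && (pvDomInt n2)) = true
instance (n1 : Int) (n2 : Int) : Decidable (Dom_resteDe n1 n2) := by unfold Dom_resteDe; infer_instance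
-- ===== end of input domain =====

-- B replaces A's index-managed while loop (which appends remainders to a growing list)
-- by a direct recursion on the pair (n2, n1 % n2), prepending each head; objective: simpler.


-- termination certificate for both loops: Python's % shrinks the absolute value of the divisor
theorem pvModAbsLt (a b : Int) (hb : b ≠ 0) :
    (PySem.Int.mod a b).natAbs < b.natAbs := by
  rcases lt_or_gt_of_ne hb with h | h
  · have := PySem.Int.mod_neg_bounds a h
    omega
  · have h1 := PySem.Int.mod_nonneg a h
    have h2 := PySem.Int.mod_lt a h
    omega

-- ===== PORT A =====
-- the while loop of A, step for step, over the same state (resultats, i);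
-- the hypothesis h is only the totality certificate (i + 1 is always the last index)
def resteDeLoop (resultats : List Int) (i : Nat) (h : i + 2 = resultats.length) : List Int :=
  if hb : resultats.getD (i + 1) 0 ≠ 0 then
    resteDeLoop (resultats ++ [PySem.Int.mod (resultats.getD i 0) (resultats.getD (i + 1) 0)])
      (i + 1) (by simp [List.length_append]; omega)
  else resultats
termination_by (resultats.getD (i + 1) 0).natAbs
decreasing_by
  have hidx : i + 1 + 1 = resultats.length := by omega
  simp [List.getD, hidx]
  exact pvModAbsLt _ _ hb

def resteDe (n1 : Int) (n2 : Int) : List Int := resteDeLoop [n1, n2] 0 (by simp)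

-- ===== PORT B =====
def resteDe_alt (n1 : Int) (n2 : Int) : List Int :=
  if n2 = 0 then [n1, n2] else n1 :: resteDe_alt n2 (PySem.Int.mod n1 n2)
termination_by n2.natAbs
decreasing_by exact pvModAbsLt n1 n2 (by assumption)

-- ===== PRECONDITION & SPEC =====
def Spec_resteDe (n1 : Int) (n2 : Int) (out : List Int) : Prop := out = resteDe_alt n1 n2
instance (n1 : Int) (n2 : Int) (out : List Int) : Decidable (Spec_resteDe n1 n2 out) := by unfold Spec_resteDe; infer_instance

-- ===== CLAIM (what is proved, stated in full; the proofs are below) =====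
def Claim_equal_resteDe : Prop := ∀ (n1 : Int) (n2 : Int), Dom_resteDe n1 n2 → Spec_resteDe n1 n2 (resteDe n1 n2)

-- ===== LEMMAS AND PROOFS =====
-- loop invariant: with the list acc ++ [a, b] and i = acc.length, A's loop produces acc ++ B's result on (a, b)
theorem resteDeLoop_eq (n : Nat) : ∀ (acc : List Int) (a b : Int)
    (h : acc.length + 2 = (acc ++ [a, b]).length), b.natAbs ≤ n →
    resteDeLoop (acc ++ [a, b]) acc.length h = acc ++ resteDe_alt a b := by
  induction n with
  | zero =>
    intro acc a b h hb
    have hb0 : b = 0 := by omega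
    subst hb0
    rw [resteDeLoop, resteDe_alt]
    simp [List.getD]
  | succ n ih =>
    intro acc a b h hb
    rw [resteDeLoop, resteDe_alt]
    have hga : (acc ++ [a, b]).getD acc.length 0 = a := by
      simp [List.getD]
    have hgb : (acc ++ [a, b]).getD (acc.length + 1) 0 = b := by
      simp [List.getD]
    by_cases hb0 : b = 0
    · simp [hb0]
    · rw [if_neg hb0]
      simp only [hga, hgb]
      rw [dif_pos hb0]
      have hassoc : (acc ++ [a, b]) ++ [PySem.Int.mod a b] = (acc ++ [a]) ++ [b, PySem.Int.mod a b] := by simp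
      have hlen : acc.length + 1 = (acc ++ [a]).length := by simp
      simp only [hassoc, hlen]
      have hmod : (PySem.Int.mod a b).natAbs ≤ n := by
        have := pvModAbsLt a b hb0
        omega
      rw [ih (acc ++ [a]) b (PySem.Int.mod a b) (by simp) hmod]
      simp

-- ===== VERDICT (by name: the statement is the Claim_ definition above) =====
theorem resteDe_spec : Claim_equal_resteDe := by
  intro n1 n2 _
  unfold Spec_resteDe resteDe
  have := resteDeLoop_eq n2.natAbs [] n1 n2 (by simp) (le_refl _)
  simpa using this
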